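-- pv_equiv track=rewrite | github.com/D3NKYT0/conecta | resources/utils.py | base36encode
-- ===== SOURCE A (Python) =====
-- def base36encode(number):
--     base36, sign, alphabet = str(), str(), '0123456789ABCDEFGHIJKLMNOPQRSTUVWXYZ'
--     if number < 0:
--         sign = '-'
--         number = -number
--     if 0 <= number < len(alphabet):
--         return sign + alphabet[number]
--     while number != 0:
--         number, i = divmod(number, len(alphabet))
--         base36 = alphabet[i] + base36
--     return sign + base36
-- ===== SOURCE B (Python) =====
-- def base36encode(number):
--     alphabet = '0123456789ABCDEFGHIJKLMNOPQRSTUVWXYZ'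
--     if number < 0:
--         return '-' + base36encode(-number)
--     if number < len(alphabet):
--         return alphabet[number]
--     return base36encode(number // len(alphabet)) + alphabet[number % len(alphabet)]
-- ===== Notes on version B (the rewrite author's own statement) =====
-- stated objective: alternative
-- what changed: Replaces the explicit divmod while-loop that prepends digits into an accumulator string with direct recursion on the quotient that appends the last digit, removing the separate single-digit early-return path and the sign/accumulator state.
import Mathlib
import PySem

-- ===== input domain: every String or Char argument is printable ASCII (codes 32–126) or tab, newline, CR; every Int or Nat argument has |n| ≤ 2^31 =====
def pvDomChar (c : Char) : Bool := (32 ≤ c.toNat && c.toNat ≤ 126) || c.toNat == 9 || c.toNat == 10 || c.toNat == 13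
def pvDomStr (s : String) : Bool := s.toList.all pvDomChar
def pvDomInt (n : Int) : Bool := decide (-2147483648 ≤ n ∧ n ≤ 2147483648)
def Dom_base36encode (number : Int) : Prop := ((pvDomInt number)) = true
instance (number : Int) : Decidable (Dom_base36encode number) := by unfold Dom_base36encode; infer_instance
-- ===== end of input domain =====

-- B replaces A's explicit divmod while-loop (digit-prepending accumulator plus a single-digit
-- early return) with direct recursion on the quotient appending the last digit; same values.

-- ===== PORT A =====
-- the alphabet as a char list; alphabet[i] with i known in range is exact via List.getD
def pvAlpha : List Char := "0123456789ABCDEFGHIJKLMNOPQRSTUVWXYZ".toList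

-- the while-loop: while number != 0: number, i = divmod(number, 36); base36 = alphabet[i] + base36
def base36loopA (n : Nat) (acc : List Char) : List Char :=
  if n = 0 then acc
  else base36loopA (n / 36) (pvAlpha.getD (n % 36) '0' :: acc)
decreasing_by exact Nat.div_lt_self (Nat.pos_of_ne_zero (by assumption)) (by omega)

def base36encode (number : Int) : String :=
  -- sign handling: sign = '-' and number = -number when negative (nonneg magnitude = natAbs)
  let sign : List Char := if number < 0 then ['-'] else []
  let n : Nat := number.natAbs
  if n < 36 then String.mk (sign ++ [pvAlpha.getD n '0'])
  else String.mk (sign ++ base36loopA n [])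

-- ===== PORT B =====
-- recursion on the quotient; base case a single digit
def base36recB (n : Nat) : List Char :=
  if n < 36 then [pvAlpha.getD n '0']
  else base36recB (n / 36) ++ [pvAlpha.getD (n % 36) '0']
decreasing_by exact Nat.div_lt_self (by omega) (by omega)

def base36encode_alt (number : Int) : String :=
  if number < 0 then String.mk ('-' :: base36recB (-number).toNat)
  else String.mk (base36recB number.toNat)

-- ===== PRECONDITION & SPEC =====
def Spec_base36encode (number : Int) (out : String) : Prop := out = base36encode_alt number
instance (number : Int) (out : String) : Decidable (Spec_base36encode number out) := by unfold Spec_base36encode; infer_instance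

-- ===== CLAIM (what is proved, stated in full; the proofs are below) =====
def Claim_equal_base36encode : Prop := ∀ (number : Int), Dom_base36encode number → Spec_base36encode number (base36encode number)

-- ===== LEMMAS AND PROOFS =====

theorem recB_small (n : Nat) (h : n < 36) : base36recB n = [pvAlpha.getD n '0'] := by
  rw [base36recB]; simp [h]

theorem loopA_eq_recB (n : Nat) (hn : n ≠ 0) (acc : List Char) :
    base36loopA n acc = base36recB n ++ acc := by
  induction n using Nat.strong_induction_on generalizing acc with
  | _ n ih =>
    rw [base36loopA, base36recB]
    by_cases h36 : n < 36
    · have h0 : n / 36 = 0 := Nat.div_eq_of_lt h36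
      have hm : n % 36 = n := Nat.mod_eq_of_lt h36
      simp [hn, h0, hm, base36loopA, h36]
    · have hq : n / 36 ≠ 0 := fun h =>
        h36 (Nat.lt_of_div_eq_zero (by omega) h)
      simp only [if_neg hn, if_neg h36]
      rw [ih (n / 36) (Nat.div_lt_self (Nat.pos_of_ne_zero hn) (by omega)) hq]
      simp

-- ===== VERDICT (by name: the statement is the Claim_ definition above) =====
theorem base36encode_spec : Claim_equal_base36encode := by
  intro number _
  unfold Spec_base36encode base36encode base36encode_alt
  rcases lt_trichotomy number 0 with hneg | hzero | hpos
  · have hn : number.natAbs ≠ 0 := by omega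
    have hto : (-number).toNat = number.natAbs := by omega
    by_cases h36 : number.natAbs < 36
    · rw [hto, recB_small _ h36]
      simp [hneg, h36]
    · simp only [hneg, if_pos, if_neg h36, hto]
      rw [loopA_eq_recB _ hn]
      simp
  · subst hzero; norm_num; rw [recB_small 0 (by omega)]; rfl
  · have hnn : ¬ number < 0 := by omega
    have hto : number.toNat = number.natAbs := by omega
    by_cases h36 : number.natAbs < 36
    · rw [hto, recB_small _ h36]
      simp [hnn, h36]
    · have hn : number.natAbs ≠ 0 := by omega
      simp only [if_neg hnn, if_neg h36, hto]
      rw [loopA_eq_recB _ hn]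
      simp
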